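-- pv_equiv track=rewrite | github.com/pypi-data/pypi-mirror-350 | packages/sugcommand/sugcommand-0.2.0.tar.gz/sugcommand-0.2.0/src/sugcommand/core/history_analyzer.py | _extract_command_from_line
-- ===== SOURCE A (Python) =====
-- from typing import Dict, List, Set, Optional, Tuple, Any
--
-- def _extract_command_from_line(line: str) -> Optional[str]:
--     """Extract the base command from a command line."""
--     # Remove leading/trailing whitespace
--     line = line.strip()
--
--     if not line:
--         return None
--
--     # Split by pipes, redirections, and logical operators
--     # to get the first command
--     separators = ['|', '>', '>>', '<', '&&', '||', ';']
--     first_part = line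
--
--     for sep in separators:
--         if sep in first_part:
--             first_part = first_part.split(sep)[0].strip()
--
--     # Extract the first word (the command)
--     parts = first_part.split()
--     if not parts:
--         return None
--
--     command = parts[0]
--
--     # Remove common prefixes
--     prefixes = ['sudo', 'nohup', 'nice', 'ionice', 'time']
--     while command in prefixes and len(parts) > 1:
--         parts = parts[1:]
--         command = parts[0]
--
--     return command
-- ===== SOURCE B (Python) =====
-- from typing import Optional
--
-- def _extract_command_from_line(line: str) -> Optional[str]:
--     """Extract the base command from a command line (single-pass separator scan)."""
--     line = line.strip()
--     if not line:
--         return None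
--
--     # Single left-to-right pass: cut at the earliest command boundary.
--     # A boundary is '|', '>', '<', ';' or the pair '&&'.
--     cut = len(line)
--     for i, ch in enumerate(line):
--         if ch in '|><;' or (ch == '&' and line[i:i + 2] == '&&'):
--             cut = i
--             break
--
--     parts = line[:cut].split()
--     if not parts:
--         return None
--
--     # First word that is not a wrapper prefix; the last word if all are.
--     prefixes = ('sudo', 'nohup', 'nice', 'ionice', 'time')
--     for word in parts[:-1]:
--         if word not in prefixes:
--             return word
--     return parts[-1]
-- ===== Notes on version B (the rewrite author's own statement) =====
-- stated objective: alternative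
-- what changed: B replaces A's seven sequential split(sep)[0].strip() passes with one left-to-right scan that cuts at the earliest separator boundary ('|','>','<',';' or '&&'), and replaces the wrapper-prefix while-loop with a first-match scan over the words.
import Mathlib
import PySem

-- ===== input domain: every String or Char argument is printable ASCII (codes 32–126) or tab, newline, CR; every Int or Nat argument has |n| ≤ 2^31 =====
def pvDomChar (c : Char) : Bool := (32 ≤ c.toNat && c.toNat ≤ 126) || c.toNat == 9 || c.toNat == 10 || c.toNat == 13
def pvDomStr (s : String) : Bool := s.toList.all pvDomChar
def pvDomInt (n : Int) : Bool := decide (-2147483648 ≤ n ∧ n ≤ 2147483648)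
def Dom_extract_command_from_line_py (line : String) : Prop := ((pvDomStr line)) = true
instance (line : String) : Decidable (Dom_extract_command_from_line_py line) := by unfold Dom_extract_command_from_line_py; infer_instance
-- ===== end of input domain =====

-- ===== PORT A =====
-- B changes: one scan finds the earliest separator boundary instead of seven repeated
-- split-and-strip passes, and the wrapper-prefix while loop becomes a first-match scan
-- over the words (objective: alternative single-pass decomposition).

-- the wrapper prefixes ['sudo', 'nohup', 'nice', 'ionice', 'time'] (shared constant)
def pvPrefixes : List (List Char) :=
  [['s','u','d','o'], ['n','o','h','u','p'], ['n','i','c','e'],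
   ['i','o','n','i','c','e'], ['t','i','m','e']]

-- separators = ['|', '>', '>>', '<', '&&', '||', ';']
def pvSeps : List (List Char) :=
  [['|'], ['>'], ['>','>'], ['<'], ['&','&'], ['|','|'], [';']]

-- loop body: if sep in first_part: first_part = first_part.split(sep)[0].strip()
-- (str.split(sep) always returns a non-empty list, so [0] is its head)
def pvStepA (fp : List Char) (sep : List Char) : List Char :=
  if PySem.Chars.isIn sep fp then PySem.Chars.strip ((PySem.Chars.splitOn fp sep).headD []) else fp

-- while command in prefixes and len(parts) > 1: parts = parts[1:]; command = parts[0]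
-- (state: command = head word, the remaining words)
def pvLoopA : List Char → List (List Char) → List Char
  | command, [] => command
  | command, c2 :: rest => if command ∈ pvPrefixes then pvLoopA c2 rest else command

def extract_command_from_line_py (line : String) : Option String :=
  let l := PySem.Chars.strip line.toList
  if l = [] then none
  else
    let first_part := pvSeps.foldl pvStepA l
    match PySem.Chars.split₀ first_part with
    | [] => none
    | p :: ps => some (String.ofList (pvLoopA p ps))

-- ===== PORT B =====
-- boundary characters '|><;' of Source B
def pvBoundaryChars : List Char := ['|', '>', '<', ';']

-- for i, ch in enumerate(line): if ch in '|><;' or (ch == '&' and line[i:i+2] == '&&'): cut = i; break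
-- (returns the break index i, or len(line) if no break)
def pvFindCut : List Char → Nat → Nat
  | [], i => i
  | c :: rest, i =>
    if c ∈ pvBoundaryChars ∨ (c = '&' ∧ rest.head? = some '&') then i
    else pvFindCut rest (i + 1)

-- for word in parts[:-1]: if word not in prefixes: return word;  return parts[-1]
def pvFirstWord : List (List Char) → List Char → List Char
  | [], last => last
  | w :: rest, last => if w ∈ pvPrefixes then pvFirstWord rest last else w

def extract_command_from_line_py_alt (line : String) : Option String :=
  let l := PySem.Chars.strip line.toList
  if l = [] then none
  else
    let cut := pvFindCut l 0
    match PySem.Chars.split₀ (l.take cut) with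
    | [] => none
    | p :: ps => some (String.ofList (pvFirstWord ((p :: ps).dropLast) (ps.getLastD p)))

-- ===== PRECONDITION & SPEC =====
def Spec_extract_command_from_line_py (line : String) (out : Option String) : Prop := out = extract_command_from_line_py_alt line
instance (line : String) (out : Option String) : Decidable (Spec_extract_command_from_line_py line out) := by unfold Spec_extract_command_from_line_py; infer_instance

-- ===== CLAIM (what is proved, stated in full; the proofs are below) =====
def Claim_equal_extract_command_from_line_py : Prop := ∀ (line : String), Dom_extract_command_from_line_py line → Spec_extract_command_from_line_py line (extract_command_from_line_py line)

-- ===== LEMMAS AND PROOFS =====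
-- the prefix of l up to the first boundary (specification of pvFindCut + take)
def pvScan : List Char → List Char
  | [] => []
  | c :: rest => if c ∈ pvBoundaryChars ∨ (c = '&' ∧ rest.head? = some '&') then [] else c :: pvScan rest

lemma pvFindCut_eq (l : List Char) : ∀ i : Nat, pvFindCut l i = i + (pvScan l).length := by
  induction l with
  | nil => intro i; simp [pvFindCut, pvScan]
  | cons c rest ih =>
    intro i
    by_cases h : c ∈ pvBoundaryChars ∨ (c = '&' ∧ rest.head? = some '&')
    · simp [pvFindCut, pvScan, h]
    · simp [pvFindCut, pvScan, h, ih]; omega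

lemma pvScan_prefix (l : List Char) : pvScan l <+: l := by
  induction l with
  | nil => simp [pvScan]
  | cons c rest ih =>
    by_cases h : c ∈ pvBoundaryChars ∨ (c = '&' ∧ rest.head? = some '&')
    · simp [pvScan, h]
    · simpa [pvScan, h] using ih

lemma take_pvFindCut (l : List Char) : l.take (pvFindCut l 0) = pvScan l := by
  rw [pvFindCut_eq l 0, Nat.zero_add]
  exact (List.prefix_iff_eq_take.mp (pvScan_prefix l)).symm

-- ---- splitOn head characterisation: first piece = prefix before the first occurrence ----

lemma splitOn_go_acc (sep : List Char) : ∀ (fuel : Nat) (l cur : List Char) (acc : List (List Char)),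
    PySem.Chars.splitOn.go sep fuel l cur acc = acc.reverse ++ PySem.Chars.splitOn.go sep fuel l cur [] := by
  intro fuel
  induction fuel with
  | zero => intro l cur acc; simp [PySem.Chars.splitOn.go]
  | succ f ih =>
    intro l cur acc
    cases l with
    | nil => simp [PySem.Chars.splitOn.go]
    | cons c rest =>
      simp only [PySem.Chars.splitOn.go]
      split
      · rw [ih _ _ (cur.reverse :: acc), ih _ _ ([cur.reverse])]
        simp
      · exact ih _ _ acc

lemma find_go_shift (sub : List Char) : ∀ (l : List Char) (k : Nat),
    PySem.Chars.find.go sub l k =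
      if PySem.Chars.find.go sub l 0 = -1 then -1 else k + PySem.Chars.find.go sub l 0 := by
  intro l
  induction l with
  | nil =>
    intro k
    by_cases h : sub.isEmpty <;> simp [PySem.Chars.find.go, h]
  | cons c rest ih =>
    intro k
    by_cases h : sub.isPrefixOf (c :: rest)
    · simp [PySem.Chars.find.go, h]
    · simp only [PySem.Chars.find.go, h, if_false, Bool.false_eq_true]
      rw [ih (k + 1), ih 1]
      have hge : (-1 : Int) ≤ PySem.Chars.find.go sub rest 0 := PySem.Chars.neg_one_le_find rest sub
      by_cases h2 : PySem.Chars.find.go sub rest 0 = -1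
      · simp [h2]
      · rw [if_neg h2, if_neg h2, if_neg (by omega)]
        push_cast; ring

lemma splitOn_go_head (s : List Char) : ∀ (l : List Char) (fuel : Nat) (cur : List Char),
    l.length < fuel → PySem.Chars.isIn s l = true →
    (PySem.Chars.splitOn.go s fuel l cur []).headD [] =
      cur.reverse ++ l.take (PySem.Chars.find l s).toNat := by
  intro l
  induction l with
  | nil =>
    intro fuel cur hf hin
    by_cases hs : s.isEmpty
    · cases fuel <;> simp [PySem.Chars.splitOn.go, PySem.Chars.find, PySem.Chars.find.go, hs]
    · exfalso
      simp [PySem.Chars.isIn, PySem.Chars.find, PySem.Chars.find.go, hs] at hin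
  | cons c rest ih =>
    intro fuel cur hf hin
    cases fuel with
    | zero => omega
    | succ f =>
      simp only [PySem.Chars.splitOn.go]
      by_cases hp : s.isPrefixOf (c :: rest)
      · rw [if_pos hp, splitOn_go_acc]
        simp [PySem.Chars.find, PySem.Chars.find.go, hp]
      · rw [if_neg hp]
        have hfind : PySem.Chars.find (c :: rest) s =
            if PySem.Chars.find rest s = -1 then -1 else 1 + PySem.Chars.find rest s := by
          simp only [PySem.Chars.find, PySem.Chars.find.go, hp, if_false, Bool.false_eq_true]
          exact find_go_shift s rest 1
        have hrest : PySem.Chars.find rest s ≠ -1 := by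
          intro h0
          simp [PySem.Chars.isIn, hfind, h0] at hin
        have hge : (-1 : Int) ≤ PySem.Chars.find rest s := PySem.Chars.neg_one_le_find rest s
        have hin' : PySem.Chars.isIn s rest = true := by
          simp [PySem.Chars.isIn, bne_iff_ne, hrest]
        rw [ih f (c :: cur) (by simpa using Nat.lt_of_succ_lt_succ hf) hin']
        rw [hfind, if_neg hrest]
        have : ((1 : Int) + PySem.Chars.find rest s).toNat = (PySem.Chars.find rest s).toNat + 1 := by omega
        simp [this]

lemma splitOn_head (fp s : List Char) (h : PySem.Chars.isIn s fp = true) :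
    (PySem.Chars.splitOn fp s).headD [] = fp.take (PySem.Chars.find fp s).toNat := by
  have := splitOn_go_head s fp (fp.length + 1) [] (by omega) h
  simpa [PySem.Chars.splitOn] using this

-- ---- whitespace lemmas: strip / split₀ ignore surrounding whitespace ----

lemma ws_not_boundary {c : Char} (h : PySem.Chars.isspace c = true) (r : List Char) :
    ¬ (c ∈ pvBoundaryChars ∨ (c = '&' ∧ r.head? = some '&')) := by
  intro hc
  rcases hc with hc | ⟨hc, -⟩
  · simp [pvBoundaryChars] at hc
    rcases hc with rfl | rfl | rfl | rfl <;> exact absurd h (by decide)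
  · subst hc; exact absurd h (by decide)

lemma scan_ws_append {w : List Char} (y : List Char) (hw : ∀ c ∈ w, PySem.Chars.isspace c = true) :
    pvScan (w ++ y) = w ++ pvScan y := by
  induction w with
  | nil => rfl
  | cons c w' ih =>
    have hc := hw c (by simp)
    rw [List.cons_append, pvScan, if_neg (ws_not_boundary hc _)]
    rw [ih (fun c hc => hw c (by simp [hc]))]; simp

lemma scan_all_ws (w : List Char) (hw : ∀ c ∈ w, PySem.Chars.isspace c = true) : pvScan w = w := by
  simpa [pvScan] using scan_ws_append (w := w) [] hw

lemma split0_go_ws_nil (t : List Char) (hw : ∀ c ∈ t, PySem.Chars.isspace c = true) :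
    ∀ cur acc, PySem.Chars.split₀.go t cur acc = PySem.Chars.split₀.go [] cur acc := by
  induction t with
  | nil => intro cur acc; rfl
  | cons c t' ih =>
    intro cur acc
    have hc := hw c (by simp)
    have iht := ih (fun c hc => hw c (by simp [hc]))
    simp only [PySem.Chars.split₀.go, hc, if_true]
    by_cases hcur : cur.isEmpty <;>
      simp [hcur, iht, PySem.Chars.split₀.go]

lemma split0_go_append_ws (t : List Char) (hw : ∀ c ∈ t, PySem.Chars.isspace c = true) :
    ∀ (z cur : List Char) (acc : List (List Char)),
      PySem.Chars.split₀.go (z ++ t) cur acc = PySem.Chars.split₀.go z cur acc := by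
  intro z
  induction z with
  | nil =>
    intro cur acc
    simpa using split0_go_ws_nil t hw cur acc
  | cons c z' ih =>
    intro cur acc
    simp only [List.cons_append, PySem.Chars.split₀.go]
    by_cases hc : PySem.Chars.isspace c <;> simp [hc, ih]

lemma split0_go_ws_prefix (w : List Char) (hw : ∀ c ∈ w, PySem.Chars.isspace c = true) :
    ∀ (z : List Char) (acc : List (List Char)),
      PySem.Chars.split₀.go (w ++ z) [] acc = PySem.Chars.split₀.go z [] acc := by
  induction w with
  | nil => intro z acc; rfl
  | cons c w' ih =>
    intro z acc
    have hc := hw c (by simp)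
    simp only [List.cons_append, PySem.Chars.split₀.go, hc, if_true, List.isEmpty_nil]
    exact ih (fun c hc => hw c (by simp [hc])) z acc

lemma split0_ws_prefix (w z : List Char) (hw : ∀ c ∈ w, PySem.Chars.isspace c = true) :
    PySem.Chars.split₀ (w ++ z) = PySem.Chars.split₀ z := by
  simp [PySem.Chars.split₀, split0_go_ws_prefix w hw]

lemma split0_ws_suffix (z t : List Char) (hw : ∀ c ∈ t, PySem.Chars.isspace c = true) :
    PySem.Chars.split₀ (z ++ t) = PySem.Chars.split₀ z := by
  simp [PySem.Chars.split₀, split0_go_append_ws t hw]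

lemma scan_append_ws (t : List Char) (hw : ∀ c ∈ t, PySem.Chars.isspace c = true) :
    ∀ z : List Char, pvScan (z ++ t) = pvScan z ∨ (pvScan z = z ∧ pvScan (z ++ t) = z ++ t) := by
  intro z
  induction z with
  | nil => exact Or.inr ⟨rfl, by simpa using scan_all_ws t hw⟩
  | cons c z' ih =>
    have hcond : (c ∈ pvBoundaryChars ∨ (c = '&' ∧ (z' ++ t).head? = some '&')) ↔
        (c ∈ pvBoundaryChars ∨ (c = '&' ∧ z'.head? = some '&')) := by
      cases z' with
      | nil =>
        simp only [List.nil_append, List.head?_nil]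
        constructor
        · rintro (h | ⟨rfl, hh⟩)
          · exact Or.inl h
          · exfalso
            cases t with
            | nil => simp at hh
            | cons d t' =>
              simp at hh
              have := hw d (by simp)
              rw [hh] at this
              exact absurd this (by decide)
        · rintro (h | ⟨-, hh⟩)
          · exact Or.inl h
          · simp at hh
      | cons d z'' => simp
    by_cases hc : c ∈ pvBoundaryChars ∨ (c = '&' ∧ z'.head? = some '&')
    · left
      rw [List.cons_append, pvScan, if_pos (hcond.mpr hc), pvScan, if_pos hc]
    · rw [List.cons_append, pvScan, if_neg (fun h => hc (hcond.mp h)), pvScan, if_neg hc]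
      rcases ih with h | ⟨h1, h2⟩
      · exact Or.inl (by rw [h])
      · exact Or.inr ⟨by rw [h1], by rw [h2]⟩

lemma split0_scan_strip (x : List Char) :
    PySem.Chars.split₀ (pvScan (PySem.Chars.strip x)) = PySem.Chars.split₀ (pvScan x) := by
  have hws_take : ∀ c ∈ x.takeWhile PySem.Chars.isspace, PySem.Chars.isspace c = true :=
    fun c hc => List.mem_takeWhile_imp hc
  have hx : x = x.takeWhile PySem.Chars.isspace ++ PySem.Chars.lstrip x := by
    simp [PySem.Chars.lstrip, List.takeWhile_append_dropWhile]
  have step1 : PySem.Chars.split₀ (pvScan x) = PySem.Chars.split₀ (pvScan (PySem.Chars.lstrip x)) := by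
    conv_lhs => rw [hx]
    rw [scan_ws_append _ hws_take]
    exact split0_ws_prefix _ _ hws_take
  set y := PySem.Chars.lstrip x with hy
  set z := PySem.Chars.strip x with hz
  have hzy : z = (y.reverse.dropWhile PySem.Chars.isspace).reverse := by
    simp [hz, PySem.Chars.strip, PySem.Chars.rstrip, hy]
  set t := (y.reverse.takeWhile PySem.Chars.isspace).reverse with ht
  have hwt : ∀ c ∈ t, PySem.Chars.isspace c = true := by
    intro c hc
    rw [ht, List.mem_reverse] at hc
    exact List.mem_takeWhile_imp hc
  have hyzt : y = z ++ t := by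
    rw [hzy, ht, ← List.reverse_append, List.takeWhile_append_dropWhile, List.reverse_reverse]
  have step2 : PySem.Chars.split₀ (pvScan y) = PySem.Chars.split₀ (pvScan z) := by
    rw [hyzt]
    rcases scan_append_ws t hwt z with h | ⟨h1, h2⟩
    · rw [h]
    · rw [h2, h1, split0_ws_suffix z t hwt]
  rw [step1, step2]

-- ---- the scanned prefix is invariant under each split-at-separator step ----

lemma sep_ne_nil : ∀ s ∈ pvSeps, s ≠ [] := by decide

lemma sep_amp : ∀ s ∈ pvSeps, s.head? = some '&' → s = ['&', '&'] := by decide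

lemma sep_prefix_scan {s l : List Char} (hs : s ∈ pvSeps) (h : s <+: l) : pvScan l = [] := by
  obtain ⟨tl, rfl⟩ := h
  simp [pvSeps] at hs
  rcases hs with rfl | rfl | rfl | rfl | rfl | rfl | rfl <;>
    simp [pvScan, pvBoundaryChars]

lemma scan_take_min {s : List Char} (hs : s ∈ pvSeps) :
    ∀ (p : Nat) (l : List Char), s <+: l.drop p → (∀ i < p, ¬ s <+: l.drop i) →
      pvScan (l.take p) = pvScan l := by
  intro p
  induction p with
  | zero =>
    intro l hocc _
    simp only [List.drop_zero] at hocc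
    simp [pvScan, sep_prefix_scan hs hocc]
  | succ q ih =>
    intro l hocc hmin
    cases l with
    | nil =>
      exfalso
      rw [List.drop_nil, List.prefix_nil] at hocc
      exact sep_ne_nil s hs hocc
    | cons c rest =>
      rw [List.drop_succ_cons] at hocc
      by_cases hcb : c ∈ pvBoundaryChars
      · rw [List.take_succ_cons, pvScan, if_pos (Or.inl hcb), pvScan, if_pos (Or.inl hcb)]
      · cases q with
        | zero =>
          have hscanrest : pvScan rest = [] := by
            simpa using sep_prefix_scan hs hocc
          have hcond : ¬ (c ∈ pvBoundaryChars ∨ (c = '&' ∧ rest.head? = some '&')) := by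
            rintro (h | ⟨rfl, hh⟩)
            · exact hcb h
            · -- then s starts with '&', so s = "&&", which already occurs at position 0
              have hshead : s.head? = some '&' := by
                obtain ⟨tl, htl⟩ := hocc
                cases s with
                | nil => exact absurd rfl (sep_ne_nil [] hs)
                | cons a s' =>
                  cases rest with
                  | nil => simp at htl
                  | cons b r' =>
                    simp only [List.head?_cons, Option.some.injEq] at hh ⊢
                    have hab : a = b := by
                      rw [List.cons_append] at htl
                      exact (List.cons.injEq _ _ _ _ ▸ htl : _ ∧ _).1
                    rw [hab, hh]
              have hamp := sep_amp s hs hshead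
              subst hamp
              obtain ⟨r', rfl⟩ : ∃ r', rest = '&' :: r' := by
                cases rest with
                | nil => simp at hh
                | cons b r' => simp at hh; exact ⟨r', by rw [hh]⟩
              exact hmin 0 (by omega) ⟨r', by simp⟩
          have hc1 : ¬ (c ∈ pvBoundaryChars ∨ (c = '&' ∧ (List.nil (α := Char)).head? = some '&')) := by
            rintro (h | ⟨-, hh⟩)
            · exact hcb h
            · simp at hh
          rw [List.take_succ_cons, List.take_zero, pvScan, if_neg hc1]
          conv_rhs => rw [pvScan]
          rw [if_neg hcond, hscanrest]
          simp [pvScan]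
        | succ q' =>
          cases rest with
          | nil =>
            exfalso
            rw [List.drop_nil, List.prefix_nil] at hocc
            exact sep_ne_nil s hs hocc
          | cons d rest' =>
            have hcond : (c ∈ pvBoundaryChars ∨ (c = '&' ∧ ((d :: rest').take (q' + 1)).head? = some '&')) ↔
                (c ∈ pvBoundaryChars ∨ (c = '&' ∧ (d :: rest').head? = some '&')) := by simp
            have ihr : pvScan ((d :: rest').take (q' + 1)) = pvScan (d :: rest') := by
              refine ih (d :: rest') hocc ?_
              intro i hi
              exact fun hpre => hmin (i + 1) (by omega) (by simpa using hpre)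
            by_cases hc2 : c ∈ pvBoundaryChars ∨ (c = '&' ∧ (d :: rest').head? = some '&')
            · rw [List.take_succ_cons, pvScan, if_pos (hcond.mpr hc2), pvScan, if_pos hc2]
            · rw [List.take_succ_cons, pvScan, if_neg (fun h => hc2 (hcond.mp h)),
                pvScan, if_neg hc2, ihr]

lemma step_invariant {s : List Char} (hs : s ∈ pvSeps) (fp : List Char) :
    PySem.Chars.split₀ (pvScan (pvStepA fp s)) = PySem.Chars.split₀ (pvScan fp) := by
  unfold pvStepA
  by_cases h : PySem.Chars.isIn s fp
  · rw [if_pos h, splitOn_head fp s h, split0_scan_strip]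
    have hnn : 0 ≤ PySem.Chars.find fp s :=
      (PySem.Chars.find_nonneg_iff _ _).mpr ((PySem.Chars.isIn_iff_infix _ _).mp h)
    obtain ⟨hocc, hmin⟩ := PySem.Chars.find_spec hnn
    rw [scan_take_min hs (PySem.Chars.find fp s).toNat fp hocc hmin]
  · rw [if_neg h]

lemma fold_invariant : ∀ (seps : List (List Char)), (∀ s ∈ seps, s ∈ pvSeps) → ∀ fp : List Char,
    PySem.Chars.split₀ (pvScan (seps.foldl pvStepA fp)) = PySem.Chars.split₀ (pvScan fp) := by
  intro seps
  induction seps with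
  | nil => intro _ fp; rfl
  | cons u rest ih =>
    intro hsub fp
    rw [List.foldl_cons, ih (fun s hs => hsub s (by simp [hs])) (pvStepA fp u),
      step_invariant (hsub u (by simp)) fp]

-- ---- after the fold no separator occurs, so the scan is the identity there ----

lemma strip_infix (y : List Char) : PySem.Chars.strip y <:+: y := by
  have h1 : PySem.Chars.lstrip y <:+ y := List.dropWhile_suffix _
  have h2 : PySem.Chars.rstrip (PySem.Chars.lstrip y) <+: PySem.Chars.lstrip y := by
    unfold PySem.Chars.rstrip
    rw [← List.reverse_suffix]
    simpa using List.dropWhile_suffix (l := (PySem.Chars.lstrip y).reverse) PySem.Chars.isspace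
  exact (h2.isInfix).trans h1.isInfix

lemma stepA_infix (fp s : List Char) : pvStepA fp s <:+: fp := by
  unfold pvStepA
  by_cases h : PySem.Chars.isIn s fp
  · rw [if_pos h, splitOn_head fp s h]
    exact (strip_infix _).trans (List.take_prefix _ _).isInfix
  · rw [if_neg h]

lemma fold_infix (seps : List (List Char)) : ∀ fp : List Char, seps.foldl pvStepA fp <:+: fp := by
  induction seps with
  | nil => intro fp; exact List.infix_rfl
  | cons u rest ih =>
    intro fp
    exact (ih (pvStepA fp u)).trans (stepA_infix fp u)

lemma isIn_false_infix {s x y : List Char} (h : PySem.Chars.isIn s x = false) (hxy : y <:+: x) :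
    PySem.Chars.isIn s y = false := by
  rw [PySem.Chars.isIn_eq_false_iff] at h ⊢
  exact fun hinf => h (hinf.trans hxy)

lemma stepA_not_in {s : List Char} (hs : s ∈ pvSeps) (fp : List Char) :
    PySem.Chars.isIn s (pvStepA fp s) = false := by
  unfold pvStepA
  by_cases h : PySem.Chars.isIn s fp
  · rw [if_pos h, splitOn_head fp s h]
    have hnn : 0 ≤ PySem.Chars.find fp s :=
      (PySem.Chars.find_nonneg_iff _ _).mpr ((PySem.Chars.isIn_iff_infix _ _).mp h)
    obtain ⟨-, hmin⟩ := PySem.Chars.find_spec hnn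
    set p := (PySem.Chars.find fp s).toNat with hp
    have htake : PySem.Chars.isIn s (fp.take p) = false := by
      rw [PySem.Chars.isIn_eq_false_iff]
      intro hinf
      obtain ⟨j, hj⟩ := (PySem.Chars.exists_prefix_drop_iff_isIn _ _).mpr
        ((PySem.Chars.isIn_iff_infix _ _).mpr hinf)
      have hne : s ≠ [] := sep_ne_nil s hs
      have hnonempty : (fp.take p).drop j ≠ [] := by
        intro h0
        rw [h0, List.prefix_nil] at hj
        exact hne hj
      have hjp : j < p := by
        have := List.length_pos_iff.mpr hnonempty
        simp only [List.length_drop, List.length_take] at this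
        omega
      rw [List.drop_take] at hj
      have : s <+: fp.drop j := hj.trans (List.take_prefix _ _)
      exact hmin j hjp this
    exact isIn_false_infix htake (strip_infix _)
  · rw [if_neg h]
    simpa using h

lemma fold_not_in : ∀ (seps : List (List Char)) (fp s : List Char), s ∈ seps →
    (∀ u ∈ seps, u ∈ pvSeps) →
    PySem.Chars.isIn s (seps.foldl pvStepA fp) = false := by
  intro seps
  induction seps with
  | nil => intro fp s hmem _; simp at hmem
  | cons u rest ih =>
    intro fp s hmem hsub
    rw [List.foldl_cons]
    rcases List.mem_cons.mp hmem with rfl | hmem'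
    · exact isIn_false_infix (stepA_not_in (hsub s (by simp)) fp) (fold_infix rest _)
    · exact ih (pvStepA fp u) s hmem' (fun v hv => hsub v (by simp [hv]))

lemma singleton_infix_of_mem {c : Char} {l : List Char} (h : c ∈ l) : [c] <:+: l := by
  obtain ⟨s, t, rfl⟩ := List.append_of_mem h
  exact ⟨s, t, by simp⟩

lemma scan_clean : ∀ r : List Char, (∀ s ∈ pvSeps, PySem.Chars.isIn s r = false) → pvScan r = r := by
  intro r
  induction r with
  | nil => intro _; rfl
  | cons c rest ih =>
    intro h
    have hrest : ∀ s ∈ pvSeps, PySem.Chars.isIn s rest = false := fun s hs =>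
      isIn_false_infix (h s hs) (List.suffix_cons c rest).isInfix
    have hcond : ¬ (c ∈ pvBoundaryChars ∨ (c = '&' ∧ rest.head? = some '&')) := by
      rintro (hb | ⟨rfl, hh⟩)
      · have hsep : [c] ∈ pvSeps := by
          simp [pvBoundaryChars] at hb
          rcases hb with rfl | rfl | rfl | rfl <;> simp [pvSeps]
        have hc := h [c] hsep
        rw [PySem.Chars.isIn_eq_false_iff] at hc
        exact hc (singleton_infix_of_mem (by simp))
      · obtain ⟨r', rfl⟩ : ∃ r', rest = '&' :: r' := by
          cases rest with
          | nil => simp at hh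
          | cons b r' => simp at hh; exact ⟨r', by rw [hh]⟩
        have hc := h ['&', '&'] (by simp [pvSeps])
        rw [PySem.Chars.isIn_eq_false_iff] at hc
        exact hc ⟨[], r', by simp⟩
    rw [pvScan, if_neg hcond, ih hrest]

-- ---- the two wrapper-prefix loops agree ----

lemma word_loop : ∀ (ps : List (List Char)) (p : List Char),
    pvLoopA p ps = pvFirstWord ((p :: ps).dropLast) (ps.getLastD p) := by
  intro ps
  induction ps with
  | nil => intro p; rfl
  | cons c2 rest ih =>
    intro p
    rw [pvLoopA]
    by_cases hp : p ∈ pvPrefixes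
    · rw [if_pos hp, ih c2]
      have h1 : ((p :: c2 :: rest).dropLast) = p :: (c2 :: rest).dropLast := by simp
      rw [h1, pvFirstWord, if_pos hp]
      cases rest <;> simp [List.getLastD]
    · rw [if_neg hp]
      have h1 : ((p :: c2 :: rest).dropLast) = p :: (c2 :: rest).dropLast := by simp
      rw [h1, pvFirstWord, if_neg hp]

-- ===== VERDICT (by name: the statement is the Claim_ definition above) =====
set_option maxHeartbeats 2000000 in
theorem extract_command_from_line_py_spec : Claim_equal_extract_command_from_line_py := by
  intro line _
  show extract_command_from_line_py line = extract_command_from_line_py_alt line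
  have hA : extract_command_from_line_py line =
      (if PySem.Chars.strip line.toList = [] then none else
        match PySem.Chars.split₀ (pvSeps.foldl pvStepA (PySem.Chars.strip line.toList)) with
        | [] => none
        | p :: ps => some (String.ofList (pvLoopA p ps))) := rfl
  have hB : extract_command_from_line_py_alt line =
      (if PySem.Chars.strip line.toList = [] then none else
        match PySem.Chars.split₀ ((PySem.Chars.strip line.toList).take
            (pvFindCut (PySem.Chars.strip line.toList) 0)) with
        | [] => none
        | p :: ps => some (String.ofList (pvFirstWord ((p :: ps).dropLast) (ps.getLastD p)))) := rfl
  rw [hA, hB]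
  set l := PySem.Chars.strip line.toList with hl
  by_cases hnil : l = []
  · rw [if_pos hnil, if_pos hnil]
  · rw [if_neg hnil, if_neg hnil]
    have hparts : PySem.Chars.split₀ (pvSeps.foldl pvStepA l) =
        PySem.Chars.split₀ (l.take (pvFindCut l 0)) := by
      rw [take_pvFindCut]
      have hclean : pvScan (pvSeps.foldl pvStepA l) = pvSeps.foldl pvStepA l :=
        scan_clean _ (fun s hs => fold_not_in pvSeps l s hs (fun _ hu => hu))
      calc PySem.Chars.split₀ (pvSeps.foldl pvStepA l)
          = PySem.Chars.split₀ (pvScan (pvSeps.foldl pvStepA l)) := by rw [hclean]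
        _ = PySem.Chars.split₀ (pvScan l) := fold_invariant pvSeps (fun _ hs => hs) l
    rw [hparts]
    cases hc : PySem.Chars.split₀ (l.take (pvFindCut l 0)) with
    | nil => rfl
    | cons p ps => simp only [word_loop ps p]
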